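-- pv_equiv track=rewrite | github.com/akochergina/rna-folding | modules/rna_sequence2.py | edges_alignement
-- ===== SOURCE A (Python) =====
-- def edges_alignement(xp:str, yp:str) -> list:
--     """
--     returns the list of the edges in an alignment
--
--     Args:
--       xp: alignment string of sequence x
--       yp: alignment string of sequence y
--
--     Returns:
--       List of edges, an edge being a tuple of the indexes of the aligned bases
--     """
--
--     indexx=1
--     indexy=1
--     edges=[]
--     for i in range(len(xp)):
--         if xp[i]!="-":
--             if yp[i]!="-":
--                 edges.append((indexx, indexy))
--                 indexx+=1
--                 indexy+=1
--             else :
--                 indexx+=1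
--         else :
--             if yp[i]!="-":
--                 indexy+=1
--     return edges
-- ===== SOURCE B (Python) =====
-- def edges_alignement(xp: str, yp: str) -> list:
--     """Two-pass variant: precompute inclusive prefix non-gap counts, then one pass emitting pairs."""
--     px = []
--     c = 0
--     for ch in xp:
--         c += ch != "-"
--         px.append(c)
--     py = []
--     c = 0
--     for ch in yp:
--         c += ch != "-"
--         py.append(c)
--     return [(px[i], py[i]) for i in range(len(xp)) if xp[i] != "-" and yp[i] != "-"]
-- ===== Notes on version B (the rewrite author's own statement) =====
-- stated objective: alternative
-- what changed: Replaces the single stateful counter loop by two precomputed inclusive prefix non-gap count tables plus a filtering comprehension that reads the indices from the tables.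
import Mathlib
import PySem

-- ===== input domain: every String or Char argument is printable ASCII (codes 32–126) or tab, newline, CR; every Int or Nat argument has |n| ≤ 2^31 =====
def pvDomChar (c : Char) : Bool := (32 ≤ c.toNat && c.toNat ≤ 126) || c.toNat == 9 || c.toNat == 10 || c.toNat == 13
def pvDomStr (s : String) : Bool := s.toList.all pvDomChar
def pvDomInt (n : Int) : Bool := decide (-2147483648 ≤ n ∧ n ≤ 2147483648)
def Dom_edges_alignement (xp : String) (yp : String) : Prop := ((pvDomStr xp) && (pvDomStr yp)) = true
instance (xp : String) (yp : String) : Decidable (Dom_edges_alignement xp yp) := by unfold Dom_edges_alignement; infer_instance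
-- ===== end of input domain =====

-- B replaces A's stateful counter loop by two inclusive prefix non-gap count tables plus a
-- filtering pass; same cost, different decomposition.

-- ===== PORT A =====
-- loop body of A (the two Option Char arguments are xp[i], yp[i]; none = IndexError, excluded by Pre_)
def pvStepA (st : Int × Int × List (Int × Int)) :
    Option Char → Option Char → Int × Int × List (Int × Int)
  | some cx, some cy =>
    if cx ≠ '-' then
      if cy ≠ '-' then (st.1 + 1, st.2.1 + 1, st.2.2 ++ [(st.1, st.2.1)])
      else (st.1 + 1, st.2.1, st.2.2)
    else
      if cy ≠ '-' then (st.1, st.2.1 + 1, st.2.2)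
      else st
  | _, _ => st

def edges_alignement (xp : String) (yp : String) : List (Int × Int) :=
  ((PySem.List.pyRange 0 (xp.toList.length : Int) 1).foldl
    (fun st i => pvStepA st (PySem.List.pyGet? xp.toList i) (PySem.List.pyGet? yp.toList i))
    (1, 1, [])).2.2

-- ===== PORT B =====
-- helper of B: the loop building the inclusive prefix non-gap counts
def pvPrefCounts (s : List Char) : List Int :=
  (s.foldl (fun (st : Int × List Int) ch =>
      let c := st.1 + (if ch ≠ '-' then 1 else 0)
      (c, st.2 ++ [c])) ((0 : Int), ([] : List Int))).2

-- comprehension body of B (cx, cy are xp[i], yp[i]; a, b are px[i], py[i])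
def pvStepB (acc : List (Int × Int)) (ocx ocy : Option Char) (oa ob : Option Int) :
    List (Int × Int) :=
  match ocx, ocy with
  | some cx, some cy =>
    if cx ≠ '-' ∧ cy ≠ '-' then
      match oa, ob with
      | some a, some b => acc ++ [(a, b)]
      | _, _ => acc
    else acc
  | _, _ => acc

def edges_alignement_alt (xp : String) (yp : String) : List (Int × Int) :=
  (PySem.List.pyRange 0 (xp.toList.length : Int) 1).foldl
    (fun acc i => pvStepB acc (PySem.List.pyGet? xp.toList i) (PySem.List.pyGet? yp.toList i)
        (PySem.List.pyGet? (pvPrefCounts xp.toList) i) (PySem.List.pyGet? (pvPrefCounts yp.toList) i))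
    []

-- ===== PRECONDITION & SPEC =====
-- Pre_ excludes exactly the inputs on which A raises IndexError: yp shorter than xp
def Pre_edges_alignement (xp : String) (yp : String) : Prop :=
  xp.toList.length ≤ yp.toList.length
instance (xp : String) (yp : String) : Decidable (Pre_edges_alignement xp yp) := by
  unfold Pre_edges_alignement; infer_instance

def pvWitness_edges_alignement : String × String := ("A-CG", "AG-C")

def Spec_edges_alignement (xp : String) (yp : String) (out : List (Int × Int)) : Prop :=
  out = edges_alignement_alt xp yp
instance (xp : String) (yp : String) (out : List (Int × Int)) : Decidable (Spec_edges_alignement xp yp out) := by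
  unfold Spec_edges_alignement; infer_instance

-- ===== CLAIM (what is proved, stated in full; the proofs are below) =====
def Claim_equal_edges_alignement : Prop := ∀ (xp : String) (yp : String), Dom_edges_alignement xp yp → Pre_edges_alignement xp yp → Spec_edges_alignement xp yp (edges_alignement xp yp)

-- ===== LEMMAS AND PROOFS =====

-- reference recursion both ports are reduced to
def pvSpecE : List Char → List Char → Int → Int → List (Int × Int)
  | [], _, _, _ => []
  | _ :: _, [], _, _ => []
  | x :: xs, y :: ys, ix, iy =>
    if x ≠ '-' then
      if y ≠ '-' then (ix, iy) :: pvSpecE xs ys (ix + 1) (iy + 1)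
      else pvSpecE xs ys (ix + 1) iy
    else
      if y ≠ '-' then pvSpecE xs ys ix (iy + 1)
      else pvSpecE xs ys ix iy

-- recursive form of the inclusive prefix-count list, starting from offset c
def pvPx (c : Int) : List Char → List Int
  | [] => []
  | ch :: rest =>
    (c + (if ch ≠ '-' then 1 else 0)) :: pvPx (c + (if ch ≠ '-' then 1 else 0)) rest

lemma pvPrefCounts_loop (s : List Char) : ∀ (c : Int) (acc : List Int),
    (s.foldl (fun (st : Int × List Int) ch =>
      let c := st.1 + (if ch ≠ '-' then 1 else 0)
      (c, st.2 ++ [c])) (c, acc)).2 = acc ++ pvPx c s := by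
  induction s with
  | nil => intro c acc; simp [pvPx]
  | cons ch rest ih =>
    intro c acc
    simp only [List.foldl_cons, pvPx, ih]
    simp

lemma pvPrefCounts_eq (s : List Char) : pvPrefCounts s = pvPx 0 s := by
  simpa [pvPrefCounts] using pvPrefCounts_loop s 0 []

lemma pvRange_foldl {α : Type} (n : Nat) (f : α → Int → α) (a : α) :
    (PySem.List.pyRange 0 (n : Int) 1).foldl f a
      = (List.range n).foldl (fun s (k : Nat) => f s (k : Int)) a := by
  rw [PySem.List.pyRange_zero_natCast]
  exact List.foldl_map

lemma pvStepA_some (st : Int × Int × List (Int × Int)) (cx cy : Char) :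
    pvStepA st (some cx) (some cy)
      = (if cx ≠ '-' then
          if cy ≠ '-' then (st.1 + 1, st.2.1 + 1, st.2.2 ++ [(st.1, st.2.1)])
          else (st.1 + 1, st.2.1, st.2.2)
        else
          if cy ≠ '-' then (st.1, st.2.1 + 1, st.2.2)
          else st) := rfl

lemma pvStepB_some (acc : List (Int × Int)) (cx cy : Char) (oa ob : Option Int) :
    pvStepB acc (some cx) (some cy) oa ob
      = (if cx ≠ '-' ∧ cy ≠ '-' then
          match oa, ob with
          | some a, some b => acc ++ [(a, b)]
          | _, _ => acc
        else acc) := rfl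

lemma foldA (xs : List Char) : ∀ (ys : List Char), xs.length ≤ ys.length →
    ∀ (ix iy : Int) (acc : List (Int × Int)),
    ((List.range xs.length).foldl
      (fun st (k : Nat) => pvStepA st xs[k]? ys[k]?) (ix, iy, acc)).2.2
      = acc ++ pvSpecE xs ys ix iy := by
  induction xs with
  | nil => intro ys _ ix iy acc; simp [pvSpecE]
  | cons x xs ih =>
    intro ys hlen ix iy acc
    match ys, hlen with
    | y :: ys, hlen =>
      have hlen' : xs.length ≤ ys.length := by simpa using hlen
      rw [List.length_cons, List.range_succ_eq_map, List.foldl_cons, List.foldl_map]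
      simp only [List.getElem?_cons_succ, List.getElem?_cons_zero]
      by_cases hx : x = '-' <;> by_cases hy : y = '-' <;>
        simp [pvStepA_some, pvSpecE, hx, hy, ih ys hlen']

lemma foldB (xs : List Char) : ∀ (ys : List Char), xs.length ≤ ys.length →
    ∀ (cx cy : Int) (acc : List (Int × Int)),
    ((List.range xs.length).foldl
      (fun acc (k : Nat) => pvStepB acc xs[k]? ys[k]? (pvPx cx xs)[k]? (pvPx cy ys)[k]?) acc)
      = acc ++ pvSpecE xs ys (cx + 1) (cy + 1) := by
  induction xs with
  | nil => intro ys _ cx cy acc; simp [pvSpecE]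
  | cons x xs ih =>
    intro ys hlen cx cy acc
    match ys, hlen with
    | y :: ys, hlen =>
      have hlen' : xs.length ≤ ys.length := by simpa using hlen
      rw [List.length_cons, List.range_succ_eq_map, List.foldl_cons, List.foldl_map]
      simp only [pvPx, List.getElem?_cons_succ, List.getElem?_cons_zero]
      by_cases hx : x = '-' <;> by_cases hy : y = '-' <;>
        simp [pvStepB_some, pvSpecE, hx, hy, ih ys hlen']

-- ===== VERDICT (by name: the statement is the Claim_ definition above) =====
theorem edges_alignement_spec : Claim_equal_edges_alignement := by
  unfold Claim_equal_edges_alignement Spec_edges_alignement Pre_edges_alignement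
  intro xp yp _ hpre
  unfold edges_alignement edges_alignement_alt
  rw [pvRange_foldl, pvRange_foldl]
  simp only [PySem.List.pyGet?_natCast, pvPrefCounts_eq]
  rw [foldA xp.toList yp.toList hpre 1 1 []]
  rw [foldB xp.toList yp.toList hpre 0 0 []]
  norm_num
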